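-- pv_equiv track=rewrite | github.com/jacksonpradolima/ufpr-ci182-trabalhos | 201802/Matematica/CI182MAT1/8 - Honrados/codigo/sudoku.py | coluna
-- ===== SOURCE A (Python) =====
-- def coluna(n):
-- 	#coluna(n) é a lista com as posições de todas as colunas de um sudoku nxn
-- 	coluna = []
-- 	for k in range(n): #fórmula da k-ésima coluna
-- 		c = []
-- 		for p in range(n): #p é cada elemento da k-ésima coluna
-- 			c += [k + (p*n)] #deduzimos essa fórmula pra cada elemento da k-ésima coluna
-- 		coluna += [c]
-- 	return coluna
-- ===== SOURCE B (Python) =====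
-- def coluna(n):
--     # Build the sudoku grid row-major, then take columns by transposing.
--     grid = [[r * n + c for c in range(n)] for r in range(n)]
--     return [list(col) for col in zip(*grid)]
-- ===== Notes on version B (the rewrite author's own statement) =====
-- stated objective: alternative
-- what changed: B materializes the full row-major grid and obtains each column by transposing it with zip(*grid), instead of computing k + p*n per column with nested accumulator loops.
import Mathlib
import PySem

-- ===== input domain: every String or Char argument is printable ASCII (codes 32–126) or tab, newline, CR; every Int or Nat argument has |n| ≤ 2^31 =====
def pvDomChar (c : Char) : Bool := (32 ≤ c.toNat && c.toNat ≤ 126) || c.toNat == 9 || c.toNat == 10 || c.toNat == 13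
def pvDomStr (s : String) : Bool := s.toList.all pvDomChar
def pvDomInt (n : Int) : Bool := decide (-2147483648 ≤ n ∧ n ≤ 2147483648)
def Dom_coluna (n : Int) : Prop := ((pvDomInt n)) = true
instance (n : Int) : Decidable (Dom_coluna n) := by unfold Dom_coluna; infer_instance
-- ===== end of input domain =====

-- B builds the row-major grid and returns its transpose (zip(*grid)) instead of
-- computing each column's entries k + p*n with nested accumulator loops; objective: alternative.


-- ===== PORT A =====
-- literal transliteration of A: outer loop over range(n) appending column lists,
-- inner loop over range(n) appending k + p*n
def coluna (n : Int) : List (List Int) :=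
  (PySem.List.pyRange 0 n 1).foldl
    (fun col k =>
      col ++ [((PySem.List.pyRange 0 n 1).foldl (fun c p => c ++ [k + p * n]) [])])
    []

-- ===== PORT B =====
-- zip(*rows): Python-exact transpose by hand (truncates to the shortest row,
-- which on B's rectangular grid never truncates): seed with the first row's
-- singletons, then zipWith-append each further row.
def pvZipStar (rows : List (List Int)) : List (List Int) :=
  match rows with
  | [] => []
  | r :: rs =>
      rs.foldl (fun acc row => List.zipWith (fun c x => c ++ [x]) acc row)
        (r.map (fun x => [x]))

-- literal transliteration of B: grid comprehension, then [list(col) for col in zip(*grid)]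
def coluna_alt (n : Int) : List (List Int) :=
  let grid := (PySem.List.pyRange 0 n 1).map
    (fun r => (PySem.List.pyRange 0 n 1).map (fun c => r * n + c))
  pvZipStar grid

-- ===== PRECONDITION & SPEC =====
def Spec_coluna (n : Int) (out : List (List Int)) : Prop := out = coluna_alt n
instance (n : Int) (out : List (List Int)) : Decidable (Spec_coluna n out) := by unfold Spec_coluna; infer_instance

-- ===== CLAIM (what is proved, stated in full; the proofs are below) =====
def Claim_equal_coluna : Prop := ∀ (n : Int), Dom_coluna n → Spec_coluna n (coluna n)

-- ===== LEMMAS AND PROOFS =====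

theorem pvZipStar_block (M : List Int) (f : Int → Int → Int) :
    ∀ (rs : List Int) (g : Int → List Int),
      (rs.map (fun r => M.map (f r))).foldl
          (fun acc row => List.zipWith (fun c x => c ++ [x]) acc row) (M.map g)
      = M.map (fun c => g c ++ rs.map (fun r => f r c)) := by
  intro rs
  induction rs with
  | nil => intro g; simp
  | cons a rs ih =>
      intro g
      simp only [List.map_cons, List.foldl_cons]
      rw [show List.zipWith (fun c x => c ++ [x]) (M.map g) (M.map (f a))
            = M.map (fun c => g c ++ [f a c]) by
          rw [List.zipWith_map, List.zipWith_self]]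
      rw [ih]
      simp [List.append_assoc]

theorem pvZipStar_map_map (M : List Int) (f : Int → Int → Int) (L : List Int) (hL : L ≠ []) :
    pvZipStar (L.map (fun r => M.map (f r)))
      = M.map (fun c => L.map (fun r => f r c)) := by
  cases L with
  | nil => exact absurd rfl hL
  | cons a rs =>
      simp only [List.map_cons, pvZipStar]
      rw [show (M.map (f a)).map (fun x => [x]) = M.map (fun c => [f a c]) by simp [Function.comp]]
      rw [pvZipStar_block M f rs]
      simp

-- ===== VERDICT (by name: the statement is the Claim_ definition above) =====
theorem coluna_spec : Claim_equal_coluna := by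
  intro n _
  unfold Spec_coluna coluna coluna_alt
  rw [PySem.List.foldl_append_singleton_eq_map]
  by_cases h : PySem.List.pyRange 0 n 1 = []
  · simp [h, pvZipStar]
  · rw [pvZipStar_map_map _ (fun r c => r * n + c) _ h]
    apply List.map_congr_left
    intro k _
    rw [PySem.List.foldl_append_singleton_eq_map]
    apply List.map_congr_left
    intro p _
    ring
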